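-- pv_equiv track=rewrite | github.com/XcapeAxis/BalatroAI | trainer/record_real_session.py | _compute_move_sequence
-- ===== SOURCE A (Python) =====
-- def _compute_move_sequence(before: list[str], after: list[str]) -> list[tuple[int, int]] | None:
--     if len(before) != len(after):
--         return None
--     if sorted(before) != sorted(after):
--         return None
--     if before == after:
--         return []
--     working = list(before)
--     moves: list[tuple[int, int]] = []
--     for dst, token in enumerate(after):
--         if working[dst] == token:
--             continue
--         try:
--             src = working.index(token, dst + 1)
--         except ValueError:
--             return None
--         moved = working.pop(src)
--         working.insert(dst, moved)
--         moves.append((int(src), int(dst)))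
--     return moves if working == after else None
-- ===== SOURCE B (Python) =====
-- def _compute_move_sequence(before: list[str], after: list[str]) -> list[tuple[int, int]] | None:
--     if len(before) != len(after):
--         return None
--     rest = list(before)
--     moves: list[tuple[int, int]] = []
--     for dst, token in enumerate(after):
--         if rest and rest[0] == token:
--             rest.pop(0)
--             continue
--         try:
--             j = rest.index(token, 1)
--         except ValueError:
--             return None
--         del rest[j]
--         moves.append((dst + j, dst))
--     return moves
-- ===== Notes on version B (the rewrite author's own statement) =====
-- stated objective: simpler
-- what changed: B keeps only the not-yet-matched suffix of the working list (one deletion per move, with index offset arithmetic) and drops A's sorted-comparison precheck, its before==after precheck, its pop/insert pair and its final working==after verification, all of which are provably redundant.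
import Mathlib
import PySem

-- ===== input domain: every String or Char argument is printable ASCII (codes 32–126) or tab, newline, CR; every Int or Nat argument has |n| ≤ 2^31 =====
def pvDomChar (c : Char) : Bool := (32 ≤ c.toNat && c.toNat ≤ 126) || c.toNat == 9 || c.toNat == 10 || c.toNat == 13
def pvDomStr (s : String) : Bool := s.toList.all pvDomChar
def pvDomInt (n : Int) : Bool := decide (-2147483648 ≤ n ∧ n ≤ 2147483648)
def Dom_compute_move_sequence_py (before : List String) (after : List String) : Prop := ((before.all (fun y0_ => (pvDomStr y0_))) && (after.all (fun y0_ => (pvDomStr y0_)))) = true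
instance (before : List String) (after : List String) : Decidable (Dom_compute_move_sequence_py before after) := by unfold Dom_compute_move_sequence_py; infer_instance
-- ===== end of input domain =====

-- B is SIMPLER: it keeps only the unmatched suffix of the working list (delete-only, no pop/insert
-- pair) and drops A's sorted-comparison precheck, the before==after precheck and the final
-- verification, all of which are provably redundant; return values are identical.

-- ===== PORT A =====
-- loop body of A: pending (dst, token) pairs from enumerate(after), the mutable 'working', 'moves'.
def pvLoopA : List (Int × String) → List String → List (Int × Int) → Option (List String × List (Int × Int))
  | [], w, m => some (w, m)
  | (dst, tok) :: pend, w, m =>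
    match PySem.List.pyGet? w dst with
    | none => none   -- Python would raise IndexError here; unreachable under A's length guard
    | some x =>
      if x = tok then pvLoopA pend w m
      else
        -- working.index(token, dst+1): first index ≥ dst+1 holding token; dst+1 ≥ 0 always
        -- (enumerate starts at 0), so it is exactly index? on the dropped list, shifted back.
        match (PySem.List.index? (w.drop (dst + 1).toNat) tok).map (fun i => (dst + 1).toNat + i) with
        | none => none                       -- ValueError → return None
        | some src =>
          match PySem.List.pop? w (src : Int) with
          | none => none                     -- unreachable: src is a valid index
          | some (moved, w') =>
              pvLoopA pend (PySem.List.insert w' dst moved) (m ++ [((src : Int), dst)])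

def compute_move_sequence_py (before : List String) (after : List String) : Option (List (Int × Int)) :=
  if before.length ≠ after.length then none
  else if PySem.List.sorted before (fun x => x) ≠ PySem.List.sorted after (fun x => x) then none
  else if before = after then some []
  else
    match pvLoopA (PySem.List.enumerate after 0) before [] with
    | none => none
    | some (w, m) => if w = after then some m else none

-- ===== PORT B =====
-- loop body of B: 'rest' is the not-yet-matched suffix; one deletion per move, indices by offset.
def pvLoopB : List (Int × String) → List String → List (Int × Int) → Option (List (Int × Int))
  | [], _, m => some m
  | (dst, tok) :: pend, r, m =>
    match r with
    | [] =>
        -- 'rest' empty: the guard 'rest and rest[0] == token' is false and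
        -- rest.index(token, 1) raises ValueError → return None
        none
    | x :: rs =>
      if x = tok then pvLoopB pend rs m      -- rest.pop(0); continue
      else
        match (PySem.List.index? rs tok).map (fun i => 1 + i) with   -- rest.index(token, 1)
        | none => none                       -- ValueError → return None
        | some j => pvLoopB pend ((x :: rs).eraseIdx j) (m ++ [(dst + (j : Int), dst)])

def compute_move_sequence_py_alt (before : List String) (after : List String) : Option (List (Int × Int)) :=
  if before.length ≠ after.length then none
  else pvLoopB (PySem.List.enumerate after 0) before []

-- ===== PRECONDITION & SPEC =====
def Spec_compute_move_sequence_py (before : List String) (after : List String) (out : Option (List (Int × Int))) : Prop := out = compute_move_sequence_py_alt before after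
instance (before : List String) (after : List String) (out : Option (List (Int × Int))) : Decidable (Spec_compute_move_sequence_py before after out) := by unfold Spec_compute_move_sequence_py; infer_instance

-- ===== CLAIM (what is proved, stated in full; the proofs are below) =====
def Claim_equal_compute_move_sequence_py : Prop := ∀ (before : List String) (after : List String), Dom_compute_move_sequence_py before after → Spec_compute_move_sequence_py before after (compute_move_sequence_py before after)

-- ===== LEMMAS AND PROOFS =====

-- Ghost variant of B's loop that also returns the final 'rest' (proof-side only).
def pvLoopB' : List (Int × String) → List String → List (Int × Int) → Option (List String × List (Int × Int))
  | [], r, m => some (r, m)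
  | (dst, tok) :: pend, r, m =>
    match r with
    | [] => none
    | x :: rs =>
      if x = tok then pvLoopB' pend rs m
      else
        match (PySem.List.index? rs tok).map (fun i => 1 + i) with
        | none => none
        | some j => pvLoopB' pend ((x :: rs).eraseIdx j) (m ++ [(dst + (j : Int), dst)])

theorem pv_eraseIdx_append_length {α : Type} (L : List α) (y : α) (S : List α) :
    (L ++ y :: S).eraseIdx L.length = L ++ S := by
  induction L with
  | nil => rfl
  | cons a L ih => simp [List.eraseIdx_cons_succ, ih]

theorem pv_pop_append_length (L : List String) (y : String) (S : List String) :
    PySem.List.pop? (L ++ y :: S) ((L.length : Nat) : Int) = some (y, L ++ S) := by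
  rw [PySem.List.pop?_natCast _ _ (by simp)]
  rw [pv_eraseIdx_append_length]
  congr 1
  rw [List.getElem_append_right (by omega)]
  simp

theorem pvLoopB_eq_ghost (pend : List (Int × String)) (r : List String) (m : List (Int × Int)) :
    pvLoopB pend r m = (pvLoopB' pend r m).map Prod.snd := by
  induction pend generalizing r m with
  | nil => rfl
  | cons p pend ih =>
    obtain ⟨dst, tok⟩ := p
    cases r with
    | nil => rfl
    | cons x rs =>
      simp only [pvLoopB, pvLoopB']
      by_cases hx : x = tok
      · simp [hx, ih]
      · simp only [hx, if_false]
        cases h : (PySem.List.index? rs tok).map (fun i => 1 + i) with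
        | none => simp [PySem.List.index?_eq_idxOf?] at h; simp
        | some j =>
          simp only [PySem.List.index?_eq_idxOf?] at h
          simp [ih]

-- success of B's loop ⇒ rest is a permutation of the consumed tokens plus the leftover rest
theorem pvLoopB'_perm (pend : List (Int × String)) (r : List String) (m : List (Int × Int))
    (r' : List String) (m' : List (Int × Int)) (h : pvLoopB' pend r m = some (r', m')) :
    r.Perm (pend.map (fun p => p.2) ++ r') := by
  induction pend generalizing r m with
  | nil =>
    simp only [pvLoopB', Option.some.injEq, Prod.mk.injEq] at h
    simp [h.1]
  | cons p pend ih =>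
    obtain ⟨dst, tok⟩ := p
    cases r with
    | nil => simp [pvLoopB'] at h
    | cons x rs =>
      simp only [pvLoopB'] at h
      by_cases hx : x = tok
      · simp only [hx, if_true] at h
        subst hx
        simpa using (ih _ _ h).cons x
      · simp only [hx, if_false] at h
        rw [PySem.List.index?_eq_idxOf?] at h
        cases hidx : List.idxOf? tok rs with
        | none => simp [hidx] at h
        | some i =>
          simp only [hidx, Option.map_some] at h
          have hidx' : PySem.List.index? rs tok = some i := by
            simp [PySem.List.index?_eq_idxOf?, hidx]
          have := ih _ _ h
          obtain ⟨pre, suf, hrs, hlen, -⟩ := (PySem.List.index?_eq_some_iff rs tok i).mp hidx'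
          subst hrs
          subst hlen
          have herase : (x :: (pre ++ tok :: suf)).eraseIdx (1 + pre.length)
              = x :: (pre ++ suf) := by
            rw [Nat.add_comm 1 pre.length, List.eraseIdx_cons_succ, pv_eraseIdx_append_length]
          rw [herase] at this
          have h1 : (x :: (pre ++ tok :: suf)).Perm (tok :: x :: (pre ++ suf)) :=
            (List.perm_middle.cons x).trans (List.Perm.swap tok x _)
          simpa using h1.trans (this.cons tok)

-- if rest already equals the remaining tokens, B's loop consumes everything with no moves
theorem pvLoopB'_self (r : List String) (k : Int) (m : List (Int × Int)) :
    pvLoopB' (PySem.List.enumerate r k) r m = some ([], m) := by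
  induction r generalizing k m with
  | nil => rfl
  | cons x rs ih => simp [PySem.List.enumerate_cons, pvLoopB', ih]

-- main simulation: A's loop over pre ++ r behaves like B's ghost loop over r
theorem pv_sim (aft : List String) (pre r : List String) (m : List (Int × Int))
    (hlen : r.length = aft.length) :
    pvLoopA (PySem.List.enumerate aft (pre.length : Int)) (pre ++ r) m
      = (pvLoopB' (PySem.List.enumerate aft (pre.length : Int)) r m).map
          (fun p => (pre ++ aft ++ p.1, p.2)) := by
  induction aft generalizing pre r m with
  | nil =>
    cases r with
    | nil => simp [PySem.List.enumerate, pvLoopA, pvLoopB']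
    | cons x rs => simp at hlen
  | cons tok aftT ih =>
    cases r with
    | nil => simp at hlen
    | cons x rs =>
      have hlen' : rs.length = aftT.length := by simpa using hlen
      rw [PySem.List.enumerate_cons]
      simp only [pvLoopA, pvLoopB', PySem.List.pyGet?_append_length]
      by_cases hx : x = tok
      · subst hx
        simp only [if_true]
        have hIH := ih (pre ++ [x]) rs m hlen'
        have e1 : (((pre ++ [x]).length : Nat) : Int) = (pre.length : Int) + 1 := by
          simp
        have e2 : (pre ++ [x]) ++ rs = pre ++ x :: rs := by simp
        rw [e1, e2] at hIH
        rw [hIH]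
        congr 1
        funext p
        simp
      · simp only [hx, if_false]
        have hdrop : ((pre ++ x :: rs).drop ((pre.length : Int) + 1).toNat) = rs := by
          have ht : ((pre.length : Int) + 1).toNat = (pre ++ [x]).length := by
            simp
          rw [ht, show pre ++ x :: rs = (pre ++ [x]) ++ rs by simp, List.drop_left]
        rw [hdrop]
        cases hidx : List.idxOf? tok rs with
        | none =>
          simp [PySem.List.index?_eq_idxOf?, hidx]
        | some i =>
          have hidx' : PySem.List.index? rs tok = some i := by
            simp [PySem.List.index?_eq_idxOf?, hidx]
          obtain ⟨P, S, hrs, hlenP, -⟩ := (PySem.List.index?_eq_some_iff rs tok i).mp hidx'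
          have hi : i < rs.length := by subst hrs; simp; omega
          have hsrcNat : ((pre.length : Int) + 1).toNat + i = pre.length + 1 + i := by omega
          simp only [PySem.List.index?_eq_idxOf?, hidx, Option.map_some, hsrcNat]
          have hsplit : pre ++ x :: rs = (pre ++ x :: P) ++ tok :: S := by
            subst hrs; simp
          have hLlen : (pre ++ x :: P).length = pre.length + 1 + i := by
            simp [hlenP]; omega
          have hpop : PySem.List.pop? (pre ++ x :: rs) ((pre.length + 1 + i : Nat) : Int)
              = some (tok, pre ++ x :: (P ++ S)) := by
            rw [hsplit, hLlen.symm]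
            simpa using pv_pop_append_length (pre ++ x :: P) tok S
          rw [hpop]
          dsimp only
          have hins : PySem.List.insert (pre ++ x :: (P ++ S)) ((pre.length : Int)) tok
              = (pre ++ [tok]) ++ x :: (P ++ S) := by
            rw [show ((pre.length : Int)) = ((pre.length : Nat) : Int) by simp,
              PySem.List.insert_natCast _ _ _ (by simp)]
            simp
          rw [hins]
          have herase : (x :: rs).eraseIdx (1 + i) = x :: (P ++ S) := by
            subst hrs; subst hlenP
            rw [Nat.add_comm 1 P.length, List.eraseIdx_cons_succ, pv_eraseIdx_append_length]
          rw [herase]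
          have hM : (pre.length : Int) + ((1 + i : Nat) : Int)
              = ((pre.length + 1 + i : Nat) : Int) := by push_cast; ring
          rw [hM]
          have hrlen : (x :: (P ++ S)).length = aftT.length := by
            subst hrs; simp at hlen' ⊢; omega
          have hIH := ih (pre ++ [tok]) (x :: (P ++ S))
            (m ++ [(((pre.length + 1 + i : Nat) : Int), (pre.length : Int))]) hrlen
          have e1 : (((pre ++ [tok]).length : Nat) : Int) = (pre.length : Int) + 1 := by
            simp
          rw [e1] at hIH
          rw [show (pre ++ [tok]) ++ x :: (P ++ S) = pre ++ [tok] ++ x :: (P ++ S) by rfl]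
          rw [hIH]
          congr 1
          funext p
          simp

-- success of B ⇒ leftover rest is empty and before is a permutation of after
theorem pv_perm_of_success (before after : List String) (r' : List String) (m' : List (Int × Int))
    (hlen : before.length = after.length)
    (h : pvLoopB' (PySem.List.enumerate after 0) before [] = some (r', m')) :
    r' = [] ∧ before.Perm after := by
  have hp := pvLoopB'_perm _ _ _ _ _ h
  rw [PySem.List.map_snd_enumerate] at hp
  have hl : r'.length = 0 := by
    have := hp.length_eq
    simp at this
    omega
  have hr : r' = [] := by
    cases r' with
    | nil => rfl
    | cons a l => simp at hl
  subst hr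
  exact ⟨rfl, by simpa using hp⟩

theorem pv_sorted_eq_of_perm (before after : List String) (h : before.Perm after) :
    PySem.List.sorted before (fun x => x) = PySem.List.sorted after (fun x => x) := by
  refine PySem.List.sorted_id_eq_of_perm_of_pairwise before _ ?_ ?_
  · exact ((PySem.List.sorted_perm after (fun x => x) false).trans h.symm)
  · simpa using PySem.List.sorted_pairwise after (fun x => x)

-- ===== VERDICT (by name: the statement is the Claim_ definition above) =====
theorem compute_move_sequence_py_spec : Claim_equal_compute_move_sequence_py := by
  intro before after _
  unfold Spec_compute_move_sequence_py compute_move_sequence_py compute_move_sequence_py_alt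
  by_cases hlen : before.length = after.length
  · simp only [hlen, ne_eq, not_true_eq_false, if_false]
    rw [pvLoopB_eq_ghost]
    by_cases hsort : PySem.List.sorted before (fun x => x) = PySem.List.sorted after (fun x => x)
    · simp only [hsort, not_true_eq_false, if_false]
      by_cases heq : before = after
      · subst heq
        simp [pvLoopB'_self before 0 []]
      · simp only [heq, if_false]
        have hsim := pv_sim after [] before [] (by simpa using hlen)
        simp only [List.length_nil, Int.natCast_zero, List.nil_append] at hsim
        rw [hsim]
        cases hB : pvLoopB' (PySem.List.enumerate after 0) before [] with
        | none => simp
        | some p =>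
          obtain ⟨r', m'⟩ := p
          obtain ⟨hr', -⟩ := pv_perm_of_success before after r' m' hlen hB
          subst hr'
          simp
    · simp only [hsort, ite_not]
      cases hB : pvLoopB' (PySem.List.enumerate after 0) before [] with
      | none => simp
      | some p =>
        obtain ⟨r', m'⟩ := p
        obtain ⟨-, hperm⟩ := pv_perm_of_success before after r' m' hlen hB
        exact absurd (pv_sorted_eq_of_perm before after hperm) hsort
  · simp [hlen]
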